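-- pv_equiv track=rewrite | github.com/TomCP20/Advent-Of-Code | 2024/Day 24/Python/main.py | get_truenum
-- ===== SOURCE A (Python) =====
-- REG = dict[str, bool]
--
-- def get_truenum(reg: REG):
--     """calculates the true result"""
--     xnum: int = 0
--     ynum: int = 0
--     for name in sorted(reg, reverse=True):
--         if name[0] == "x":
--             xnum = (xnum << 1) + reg[name]
--         if name[0] == "y":
--             ynum = (ynum << 1) + reg[name]
--     truenum = xnum + ynum
--     return truenum
-- ===== SOURCE B (Python) =====
-- def get_truenum(reg):
--     """calculates the true result"""
--     total = 0
--     for pre in ("x", "y"):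
--         names = [n for n in reg if n.startswith(pre)]
--         for n in names:
--             if reg[n]:
--                 total += 1 << sum(m < n for m in names)
--     return total
-- ===== Notes on version B (the rewrite author's own statement) =====
-- stated objective: alternative
-- what changed: A sorts all register names descending once and runs a single pass with two interleaved Horner shift-and-add accumulators; B never sorts: for each prefix group ('x' then 'y') it computes each set bit's weight directly as 2^(number of group names lexicographically smaller), accumulating one total.
-- crash fix: On registers containing the empty-string name A raises IndexError (name[0]); B simply skips such a name (it starts with neither 'x' nor 'y') and returns the ordinary sum of the x- and y-parts. — e.g. on get_truenum([("", true)]): A raises IndexError, B returns 0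
import Mathlib
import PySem

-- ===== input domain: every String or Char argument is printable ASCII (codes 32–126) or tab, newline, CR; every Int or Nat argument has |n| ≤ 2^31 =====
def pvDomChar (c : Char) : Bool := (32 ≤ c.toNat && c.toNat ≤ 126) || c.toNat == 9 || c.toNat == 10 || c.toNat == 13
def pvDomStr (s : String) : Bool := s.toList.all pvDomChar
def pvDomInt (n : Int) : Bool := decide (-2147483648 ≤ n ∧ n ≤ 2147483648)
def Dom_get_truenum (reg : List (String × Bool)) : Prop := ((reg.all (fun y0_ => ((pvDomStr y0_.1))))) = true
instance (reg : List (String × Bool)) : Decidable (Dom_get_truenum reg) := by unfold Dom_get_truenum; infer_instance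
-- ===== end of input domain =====

-- B replaces A's descending sort + two interleaved Horner shift accumulators by a sort-free
-- scheme: per prefix group, each set bit's weight is 2^(number of group names lexicographically
-- smaller), summed into one total (objective: alternative; not faster).

-- ===== PORT A =====
-- literal transliteration of A: one pass over sorted(reg, reverse=True) carrying (xnum, ynum)
def get_truenum (reg : List (String × Bool)) : Int :=
  let d := PySem.Dict.ofList reg
  let r := (PySem.List.sorted d.keys (fun x => x) true).foldl
    (fun (s : Int × Int) name =>
      let xnum := if PySem.Str.pyGet? name 0 = some 'x' then
          (s.1 <<< (1 : Nat)) + (if (d.get? name).getD false then 1 else 0) else s.1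
      let ynum := if PySem.Str.pyGet? name 0 = some 'y' then
          (s.2 <<< (1 : Nat)) + (if (d.get? name).getD false then 1 else 0) else s.2
      (xnum, ynum)) (0, 0)
  r.1 + r.2

-- ===== PORT B =====
-- the body of B's outer loop: names = [n for n in reg if n.startswith(pre)];
-- for each true one add 1 << sum(m < n for m in names) (the 0/1-sum is a count)
def pv_bgroup (d : PySem.Dict String Bool) (pre : String) (total : Int) : Int :=
  let names := d.keys.filter (fun n => PySem.Str.startswith n pre)
  names.foldl (fun (t : Int) n =>
    if (d.get? n).getD false then
      t + ((1 : Int) <<< names.countP (fun m => decide (m < n)))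
    else t) total

def get_truenum_alt (reg : List (String × Bool)) : Int :=
  let d := PySem.Dict.ofList reg
  ["x", "y"].foldl (fun (total : Int) pre => pv_bgroup d pre total) 0

-- ===== PRECONDITION & SPEC =====
-- Pre_ excludes registers containing the empty-string name, on which A raises IndexError (name[0]).
def Pre_get_truenum (reg : List (String × Bool)) : Prop := ∀ p ∈ reg, p.1 ≠ ""
instance (reg : List (String × Bool)) : Decidable (Pre_get_truenum reg) := by unfold Pre_get_truenum; infer_instance
def pvWitness_get_truenum : (List (String × Bool)) := [("x01", true), ("x00", false), ("y00", true)]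

-- A raises IndexError when some register name is the empty string; B skips it and returns the sum of the x/y parts there.
def Raises_get_truenum (reg : List (String × Bool)) : Prop := ∃ p ∈ reg, p.1 = ""
instance (reg : List (String × Bool)) : Decidable (Raises_get_truenum reg) := by unfold Raises_get_truenum; infer_instance
def pvRaiseWitness_get_truenum : (List (String × Bool)) := [("", true)]
def pvRaiseWitnessOut_get_truenum : Int := 0

def Spec_get_truenum (reg : List (String × Bool)) (out : Int) : Prop := out = get_truenum_alt reg
instance (reg : List (String × Bool)) (out : Int) : Decidable (Spec_get_truenum reg out) := by unfold Spec_get_truenum; infer_instance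

-- ===== CLAIM (what is proved, stated in full; the proofs are below) =====
def Claim_equal_get_truenum : Prop := ∀ (reg : List (String × Bool)), Dom_get_truenum reg → Pre_get_truenum reg → Spec_get_truenum reg (get_truenum reg)
def Claim_raises_get_truenum : Prop := (∀ (reg : List (String × Bool)), Dom_get_truenum reg → Raises_get_truenum reg → ¬ Pre_get_truenum reg) ∧ (Dom_get_truenum (pvRaiseWitness_get_truenum) ∧ Raises_get_truenum (pvRaiseWitness_get_truenum) ∧ get_truenum_alt (pvRaiseWitness_get_truenum) = pvRaiseWitnessOut_get_truenum)

-- ===== LEMMAS AND PROOFS =====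

-- the keys of the dict built from reg are the distinct first components, in order
theorem pv_keys (reg : List (String × Bool)) :
    (PySem.Dict.ofList reg).keys = PySem.Set.ofList (reg.map Prod.fst) := by
  rw [show PySem.Dict.ofList reg = reg.foldl (fun d p => d.insert p.1 p.2) PySem.Dict.empty from rfl]
  rw [PySem.Dict.keys_foldl_insert_key]
  simp [PySem.Set.update_nil_left]

-- on a nonempty name, A's test name[0] == c agrees with B's startswith
theorem pv_pred_eq (n : String) (hn : n ≠ "") (c : Char) (p : String) (hp : p.toList = [c]) :
    decide (PySem.Str.pyGet? n 0 = some c) = PySem.Str.startswith n p := by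
  have h : n.toList ≠ [] := fun h0 => hn (String.toList_eq_nil_iff.mp h0)
  obtain ⟨d, t, ht⟩ := List.exists_cons_of_ne_nil h
  simp only [pysem, hp, ht]
  have hsw : PySem.Chars.startswith (d :: t) [c] = decide (d = c) := by
    by_cases hd : d = c
    · subst hd
      simp [(PySem.Chars.startswith_iff (s := d :: t) (p := [d])).mpr ⟨t, rfl⟩]
    · rw [decide_eq_false hd, Bool.eq_false_iff]
      intro hc
      exact hd (List.cons_prefix_cons.mp ((PySem.Chars.startswith_iff _ _).mp hc)).1.symm
  simp [hsw]

-- A's paired loop splits into two independent filtered folds.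
theorem pv_fold_split (g : String → Int) (P Q : String → Prop) [DecidablePred P] [DecidablePred Q]
    (l : List String) (x y : Int) :
    l.foldl (fun (s : Int × Int) n =>
        (if P n then (s.1 <<< (1 : Nat)) + g n else s.1,
         if Q n then (s.2 <<< (1 : Nat)) + g n else s.2)) (x, y)
    = ((l.filter (fun n => decide (P n))).foldl (fun (a : Int) n => (a <<< (1 : Nat)) + g n) x,
       (l.filter (fun n => decide (Q n))).foldl (fun (a : Int) n => (a <<< (1 : Nat)) + g n) y) := by
  induction l generalizing x y with
  | nil => rfl
  | cons h t ih =>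
      simp only [List.foldl_cons, List.filter_cons]
      by_cases hP : P h <;> by_cases hQ : Q h <;>
        simp [hP, hQ, ih]

-- a doubling fold with initial value a = a·2^len plus the fold from 0
theorem pv_fold_init (g : String → Int) (r : List String) (a : Int) :
    r.foldl (fun (x : Int) n => (x <<< (1 : Nat)) + g n) a
    = a * 2 ^ r.length + r.foldl (fun (x : Int) n => (x <<< (1 : Nat)) + g n) 0 := by
  induction r generalizing a with
  | nil => simp
  | cons h t ih =>
      rw [List.foldl_cons, List.foldl_cons]
      conv_rhs => rw [ih]
      rw [ih]
      simp only [Int.shiftLeft_eq, List.length_cons]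
      ring

-- over a strictly descending list, the Horner fold = sum of bits weighted by how many
-- list elements are smaller
theorem pv_desc_fold (g : String → Int) (r : List String)
    (hd : r.Pairwise (fun a b => b < a)) :
    r.foldl (fun (x : Int) n => (x <<< (1 : Nat)) + g n) 0
    = (r.map (fun n => g n * 2 ^ (r.countP (fun m => decide (m < n))))).sum := by
  induction r with
  | nil => simp
  | cons h t ih =>
      have hlt : ∀ b ∈ t, b < h := fun b hb => List.rel_of_pairwise_cons hd hb
      rw [List.foldl_cons, pv_fold_init, ih (List.Pairwise.of_cons hd)]
      simp only [List.map_cons, List.sum_cons, List.countP_cons]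
      have h1 : t.countP (fun m => decide (m < h)) = t.length :=
        List.countP_eq_length.mpr (fun m hm => decide_eq_true (hlt m hm))
      have h2 : (t.map (fun n => g n * 2 ^ (t.countP (fun m => decide (m < n))
                  + if decide (h < n) = true then 1 else 0))).sum
              = (t.map (fun n => g n * 2 ^ (t.countP (fun m => decide (m < n))))).sum := by
        apply congrArg
        apply List.map_congr_left
        intro n hn
        have : ¬ h < n := fun hc => absurd (hlt n hn) (lt_asymm hc)
        simp [this]
      rw [h2, h1]
      simp [Int.shiftLeft_eq]

-- B's inner accumulation loop = initial value plus a sum of guarded weights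
theorem pv_fold_addif (w : String → Int) (c : String → Bool) (l : List String) (a : Int) :
    l.foldl (fun (t : Int) n => if c n then t + w n else t) a
    = a + (l.map (fun n => if c n then w n else 0)).sum := by
  induction l generalizing a with
  | nil => simp
  | cons h t ih =>
      rw [List.foldl_cons, ih]
      by_cases hc : c h
      · simp [hc]; ring
      · simp [hc]

-- per prefix group: A's Horner fold over the reverse-sorted filtered names equals
-- B's count-of-smaller weighted sum over the unsorted filtered names
theorem pv_group (ks : List String) (hnd : ks.Nodup) (P : String → Bool) (v : String → Bool) :
    ((PySem.List.sorted ks (fun x => x) true).filter P).foldl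
        (fun (a : Int) n => (a <<< (1 : Nat)) + (if v n then 1 else 0)) 0
    = ((ks.filter P).map (fun n =>
        if v n then (1 : Int) <<< ((ks.filter P).countP (fun m => decide (m < n))) else 0)).sum := by
  have hperm : ((PySem.List.sorted ks (fun x => x) true).filter P).Perm (ks.filter P) :=
    (PySem.List.sorted_perm ks (fun x => x) true).filter P
  have hnd' : (PySem.List.sorted ks (fun x => x) true).Nodup :=
    (PySem.List.sorted_perm ks (fun x => x) true).symm.nodup hnd
  have hdesc : ((PySem.List.sorted ks (fun x => x) true).filter P).Pairwise (fun a b => b < a) := by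
    have hle := PySem.List.sorted_pairwise_rev ks (fun x => x)
    exact ((hle.and hnd').filter P).imp (fun h => lt_of_le_of_ne h.1 (Ne.symm h.2))
  rw [pv_desc_fold _ _ hdesc, ← (hperm.map _).sum_eq]
  apply congrArg
  apply List.map_congr_left
  intro n _
  rw [hperm.countP_eq]
  by_cases hv : v n <;> simp [hv, Int.shiftLeft_eq]

theorem get_truenum_spec : Claim_equal_get_truenum := by
  intro reg _ hpre
  unfold Spec_get_truenum get_truenum get_truenum_alt
  simp only [List.foldl_cons, List.foldl_nil]
  have hkeys := pv_keys reg
  have hnd : (PySem.Dict.ofList reg).keys.Nodup := by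
    rw [hkeys]; exact PySem.Set.nodup_ofList _
  have hne : ∀ n ∈ (PySem.Dict.ofList reg).keys, n ≠ "" := by
    intro n hn
    rw [hkeys, PySem.Set.mem_ofList, List.mem_map] at hn
    obtain ⟨p, hp, he⟩ := hn
    exact he ▸ hpre p hp
  rw [pv_fold_split (fun n => if ((PySem.Dict.ofList reg).get? n).getD false then (1 : Int) else 0)
      (fun n => PySem.Str.pyGet? n 0 = some 'x') (fun n => PySem.Str.pyGet? n 0 = some 'y')]
  have hS : ∀ n ∈ PySem.List.sorted (PySem.Dict.ofList reg).keys (fun x => x) true, n ≠ "" := by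
    intro n hn; exact hne n ((PySem.List.mem_sorted _ _ _ _).mp hn)
  have hfx := List.filter_congr (l := PySem.List.sorted (PySem.Dict.ofList reg).keys (fun x => x) true)
      (fun n hn => pv_pred_eq n (hS n hn) 'x' "x" rfl)
  have hfy := List.filter_congr (l := PySem.List.sorted (PySem.Dict.ofList reg).keys (fun x => x) true)
      (fun n hn => pv_pred_eq n (hS n hn) 'y' "y" rfl)
  rw [hfx, hfy,
      pv_group _ hnd (fun n => PySem.Str.startswith n "x") (fun n => ((PySem.Dict.ofList reg).get? n).getD false),
      pv_group _ hnd (fun n => PySem.Str.startswith n "y") (fun n => ((PySem.Dict.ofList reg).get? n).getD false)]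
  unfold pv_bgroup
  rw [pv_fold_addif, pv_fold_addif]
  ring

theorem get_truenum_raises : Claim_raises_get_truenum := by
  unfold Claim_raises_get_truenum
  constructor
  · intro reg _ ⟨p, hp, he⟩ hpre; exact hpre p hp he
  · decide

-- self-check: the stated raise witness does lie inside Raises_ (reads the verdict above)
theorem pv_raise_witness_ok : Raises_get_truenum pvRaiseWitness_get_truenum := get_truenum_raises.2.2.1
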